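-- pv_equiv track=rewrite | github.com/krahulgs/AstroPinch | backend/services/hilary_numerology_service.py | get_destiny_year
-- ===== SOURCE A (Python) =====
-- def get_destiny_year(fadic_number: int, current_year: int) -> int:
--     """
--     Calculates the next 'Destiny Year' for the user.
--     A Destiny Year is a year that sum-reduces to the Fadic Number.
--     """
--     # Simple iterative check from current year
--     test_year = current_year
--     for _ in range(10): # Look ahead 10 years
--         s = sum(int(d) for d in str(test_year))
--         while s > 9:
--             s = sum(int(d) for d in str(s))
--
--         if s == fadic_number:
--             return test_year
--         test_year += 1
--
--     return current_year # Fallback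
-- ===== SOURCE B (Python) =====
-- def get_destiny_year(fadic_number: int, current_year: int) -> int:
--     # Closed-form digital root instead of repeated digit-sum reduction.
--     for test_year in range(current_year, current_year + 10):
--         root = 0 if test_year == 0 else 1 + (test_year - 1) % 9
--         if root == fadic_number:
--             return test_year
--     return current_year
-- ===== Notes on version B (the rewrite author's own statement) =====
-- stated objective: simpler
-- what changed: Replaces the string-based digit sum and the inner while-loop reduction with the closed-form digital root 1 + (y-1) % 9 (0 for year 0), computed arithmetically.
import Mathlib
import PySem

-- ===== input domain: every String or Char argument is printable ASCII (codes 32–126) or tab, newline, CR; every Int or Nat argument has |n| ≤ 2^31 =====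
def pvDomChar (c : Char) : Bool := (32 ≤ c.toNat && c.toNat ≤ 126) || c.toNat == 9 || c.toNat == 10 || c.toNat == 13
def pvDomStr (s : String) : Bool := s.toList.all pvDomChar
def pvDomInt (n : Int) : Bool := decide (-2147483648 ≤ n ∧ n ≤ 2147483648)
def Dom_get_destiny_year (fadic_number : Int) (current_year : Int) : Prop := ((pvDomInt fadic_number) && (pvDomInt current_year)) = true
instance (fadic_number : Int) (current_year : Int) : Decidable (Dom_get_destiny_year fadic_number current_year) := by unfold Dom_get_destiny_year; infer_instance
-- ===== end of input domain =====

-- B replaces A's string-based digit sums and inner while-loop reduction by the closed-form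
-- digital root 1 + (y-1) % 9 (0 for year 0) — simpler, same 10-year scan.

-- ===== PORT A =====

-- int(d) for one character d of str(n); .getD 0 is never reached inside Pre_ (digits only)
def pvDigitVal (c : Char) : Int := (PySem.Int.ofChars? [c]).getD 0

-- s = sum(int(d) for d in str(n))   (toChars n = (toStr n).toList, PySem.Int.toList_toStr)
def pvDigitSum (n : Int) : Int := ((PySem.Int.toChars n).map pvDigitVal).sum

-- the two lemmas below are needed by pvReduce's termination proof, so they stay above the port
theorem pvDigitVal_digitChar (d : Nat) (hd : d < 10) : pvDigitVal (Nat.digitChar d) = (d : Int) := by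
  interval_cases d <;> decide

theorem pvToDigitsCore_eq (fuel : Nat) : ∀ (n : Nat) (ds : List Char), 0 < n → n < fuel →
    Nat.toDigitsCore 10 fuel n ds = ((Nat.digits 10 n).map Nat.digitChar).reverse ++ ds := by
  induction fuel with
  | zero => intro n ds h1 h2; omega
  | succ fuel ih =>
    intro n ds h1 _
    rw [Nat.toDigitsCore]
    by_cases h10 : n / 10 = 0
    · simp only [h10, if_true]
      have hn : n < 10 := by omega
      rw [Nat.digits_def' (by norm_num : 1 < 10) h1]
      have : Nat.digits 10 (n / 10) = [] := by rw [h10]; simp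
      rw [this]
      simp [Nat.mod_eq_of_lt hn]
    · simp only [h10, if_false]
      rw [ih (n / 10) _ (by omega) (by omega)]
      rw [Nat.digits_def' (by norm_num : 1 < 10) h1]
      simp

theorem pvSumMapDigitChar : ∀ (l : List Nat), (∀ d ∈ l, d < 10) →
    (l.map (pvDigitVal ∘ Nat.digitChar)).sum = (l.sum : Int) := by
  intro l
  induction l with
  | nil => intro _; simp
  | cons a t ih =>
    intro hd
    simp only [List.map_cons, List.sum_cons, Function.comp_apply]
    rw [pvDigitVal_digitChar a (hd a (by simp)), ih (fun d hdm => hd d (by simp [hdm]))]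
    push_cast
    ring

theorem pvDigitSum_eq (n : Int) (h : 0 ≤ n) : pvDigitSum n = ((Nat.digits 10 n.toNat).sum : Int) := by
  unfold pvDigitSum
  rw [PySem.Int.toChars]
  rw [if_neg (by omega)]
  rw [Nat.toDigits]
  by_cases h0 : n.toNat = 0
  · rw [h0]; decide
  · rw [pvToDigitsCore_eq _ _ _ (by omega) (by omega)]
    simp only [List.append_nil, List.map_reverse, List.sum_reverse, List.map_map]
    exact pvSumMapDigitChar _ (fun d hd => Nat.digits_lt_base (by norm_num) hd)

theorem pvDigitSum_lt (n : Int) (h : 9 < n) : (pvDigitSum n).toNat < n.toNat := by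
  rw [pvDigitSum_eq n (by omega)]
  have h1 : 0 < n.toNat / 10 := by omega
  have h2 := Nat.digits_def' (by norm_num : 1 < 10) (n := n.toNat) (by omega)
  have h3 := Nat.digit_sum_le 10 (n.toNat / 10)
  have : (Nat.digits 10 n.toNat).sum = n.toNat % 10 + (Nat.digits 10 (n.toNat / 10)).sum := by
    rw [h2]; simp
  omega

-- while s > 9: s = sum(int(d) for d in str(s))
def pvReduce (s : Int) : Int :=
  if 9 < s then pvReduce (pvDigitSum s) else s
termination_by s.toNat
decreasing_by exact pvDigitSum_lt s (by assumption)

-- for _ in range(10): digit-sum-reduce test_year, compare, else test_year += 1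
def pvAGo (fadic cur : Int) : Int → Nat → Int
  | _, 0 => cur
  | ty, k + 1 =>
    let s := pvReduce (pvDigitSum ty)
    if s = fadic then ty else pvAGo fadic cur (ty + 1) k

def get_destiny_year (fadic_number : Int) (current_year : Int) : Int :=
  pvAGo fadic_number current_year current_year 10

-- ===== PORT B =====

-- for test_year in range(current_year, current_year + 10): closed-form digital root
def pvBGo (fadic cur : Int) : List Int → Int
  | [] => cur
  | ty :: rest =>
    let root := if ty = 0 then (0 : Int) else 1 + PySem.Int.mod (ty - 1) 9
    if root = fadic then ty else pvBGo fadic cur rest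

def get_destiny_year_alt (fadic_number : Int) (current_year : Int) : Int :=
  pvBGo fadic_number current_year (PySem.List.pyRange current_year (current_year + 10) 1)

-- ===== PRECONDITION & SPEC =====
-- A raises ValueError for current_year < 0 (int('-') on the sign character); excluded here.
def Pre_get_destiny_year (fadic_number : Int) (current_year : Int) : Prop := 0 ≤ current_year
instance (fadic_number : Int) (current_year : Int) : Decidable (Pre_get_destiny_year fadic_number current_year) := by unfold Pre_get_destiny_year; infer_instance
def pvWitness_get_destiny_year : Int × Int := (1, 2025)

def Spec_get_destiny_year (fadic_number : Int) (current_year : Int) (out : Int) : Prop := out = get_destiny_year_alt fadic_number current_year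
instance (fadic_number : Int) (current_year : Int) (out : Int) : Decidable (Spec_get_destiny_year fadic_number current_year out) := by unfold Spec_get_destiny_year; infer_instance

-- ===== CLAIM (what is proved, stated in full; the proofs are below) =====
def Claim_equal_get_destiny_year : Prop := ∀ (fadic_number : Int) (current_year : Int), Dom_get_destiny_year fadic_number current_year → Pre_get_destiny_year fadic_number current_year → Spec_get_destiny_year fadic_number current_year (get_destiny_year fadic_number current_year)

-- ===== LEMMAS AND PROOFS =====

theorem pvSumDigitsPos (m : Nat) : 0 < m → 0 < (Nat.digits 10 m).sum := by
  induction m using Nat.strong_induction_on with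
  | _ m ih =>
  intro hm
  rw [Nat.digits_def' (by norm_num : 1 < 10) hm]
  simp only [List.sum_cons]
  by_cases h : m % 10 = 0
  · have h1 : 0 < m / 10 := by omega
    have := ih (m / 10) (by omega) h1
    omega
  · omega

theorem pvDigitSum_pos (n : Int) (h : 0 < n) : 0 < pvDigitSum n := by
  rw [pvDigitSum_eq n (by omega)]
  exact_mod_cast pvSumDigitsPos n.toNat (by omega)

theorem pvDigitSum_mod9 (n : Int) (h : 0 ≤ n) : pvDigitSum n % 9 = n % 9 := by
  rw [pvDigitSum_eq n h]
  have := Nat.modEq_nine_digits_sum n.toNat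
  unfold Nat.ModEq at this
  omega

-- digital root: A's reduce-loop result equals B's closed form, for 0 < n
theorem pvRootAux (m : Nat) : ∀ (n : Int), 0 < n → n.toNat = m →
    pvReduce (pvDigitSum n) = 1 + (n - 1) % 9 := by
  induction m using Nat.strong_induction_on with
  | _ m ih =>
  intro n h hm
  have hmod := pvDigitSum_mod9 n (by omega)
  have hpos := pvDigitSum_pos n h
  by_cases hle : n ≤ 9
  · -- digit sum of a one-digit number is itself; reduce is the identity below 10
    have hsum : pvDigitSum n = n := by
      rw [pvDigitSum_eq n (by omega)]
      have hd : Nat.digits 10 n.toNat = [n.toNat] := by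
        rw [Nat.digits_def' (by norm_num : 1 < 10) (by omega)]
        have h10 : n.toNat / 10 = 0 := by omega
        rw [h10]
        simp [Nat.mod_eq_of_lt (by omega : n.toNat < 10)]
      rw [hd]; simp; omega
    rw [hsum, pvReduce, if_neg (by omega)]
    omega
  · have hlt := pvDigitSum_lt n (by omega)
    set S := pvDigitSum n with hS
    by_cases hS9 : 9 < S
    · have hIH := ih S.toNat (by omega) S (by omega) rfl
      rw [pvReduce, if_pos hS9, hIH]
      omega
    · rw [pvReduce, if_neg hS9]
      omega

theorem pvRoot_eq' (n : Int) (h : 0 ≤ n) :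
    pvReduce (pvDigitSum n) = (if n = 0 then (0 : Int) else 1 + PySem.Int.mod (n - 1) 9) := by
  by_cases h0 : n = 0
  · rw [if_pos h0, h0]
    have hz : pvDigitSum 0 = 0 := by decide
    rw [hz, pvReduce]
    norm_num
  · rw [if_neg h0, PySem.Int.mod_eq_emod_of_pos (by norm_num : (0:Int) < 9)]
    exact pvRootAux n.toNat n (by omega) rfl

theorem pvGo_eq (fadic cur : Int) (k : Nat) : ∀ (ty : Int), 0 ≤ ty →
    pvAGo fadic cur ty k = pvBGo fadic cur (PySem.List.pyRange ty (ty + k) 1) := by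
  induction k with
  | zero =>
    intro ty _
    rw [PySem.List.pyRange_one_eq_nil (by omega)]
    rfl
  | succ k ih =>
    intro ty hty
    rw [PySem.List.pyRange_one_cons (by omega : ty < ty + (k + 1 : Nat))]
    show (if pvReduce (pvDigitSum ty) = fadic then ty else pvAGo fadic cur (ty + 1) k) =
      pvBGo fadic cur (ty :: PySem.List.pyRange (ty + 1) (ty + (k + 1 : Nat)) 1)
    rw [pvRoot_eq' ty hty]
    unfold pvBGo
    simp only []
    by_cases hc : (if ty = 0 then (0 : Int) else 1 + PySem.Int.mod (ty - 1) 9) = fadic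
    · rw [if_pos hc, if_pos hc]
    · rw [if_neg hc, if_neg hc, ih (ty + 1) (by omega)]
      have hb : ty + 1 + (k : Int) = ty + ((k + 1 : Nat) : Int) := by push_cast; ring
      rw [hb]

-- ===== VERDICT (by name: the statement is the Claim_ definition above) =====
theorem get_destiny_year_spec : Claim_equal_get_destiny_year := by
  intro fadic cur _ hpre
  unfold Spec_get_destiny_year get_destiny_year get_destiny_year_alt
  have := pvGo_eq fadic cur 10 cur hpre
  rw [this]
  norm_num
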